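-- pv_equiv track=rewrite | github.com/RoeiBrudo/StateMachineLearning | Automata - MultiClassifier/helpers.py | get_all_prefix
-- ===== SOURCE A (Python) =====
-- def word2key(arr):
--     if not arr:
--         return ''
--     else:
--         str = ''
--         for i in arr:
--             if len(str) != 0:
--                 str = str + ',' + i
--             else:
--                 str = i
--         return str
--
-- def key2word(str):
--     if str == '':
--         return []
--     else:
--         return str.split(',')
--
-- def get_all_prefix(str):
--     prefixes = []
--     word = key2word(str)
--     for i in range(len(word)):
--         str_lst = []
--         for j in range(i+1):
--             str_lst.append(word[j])
--         prefixes.append(word2key(str_lst))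
--     return prefixes
-- ===== SOURCE B (Python) =====
-- def get_all_prefix(str):
--     tokens = [] if str == '' else str.split(',')
--     prefixes = []
--     acc = ''
--     for w in tokens:
--         acc = w if not acc else acc + ',' + w
--         prefixes.append(acc)
--     return prefixes
-- ===== Notes on version B (the rewrite author's own statement) =====
-- stated objective: simpler
-- what changed: Replaces A's nested rebuild-and-rejoin (for each i, re-collect word[0..i] and re-fold it into a string) with one sweep over the tokens maintaining a running accumulator string that is appended to the result at each step.
import Mathlib
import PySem

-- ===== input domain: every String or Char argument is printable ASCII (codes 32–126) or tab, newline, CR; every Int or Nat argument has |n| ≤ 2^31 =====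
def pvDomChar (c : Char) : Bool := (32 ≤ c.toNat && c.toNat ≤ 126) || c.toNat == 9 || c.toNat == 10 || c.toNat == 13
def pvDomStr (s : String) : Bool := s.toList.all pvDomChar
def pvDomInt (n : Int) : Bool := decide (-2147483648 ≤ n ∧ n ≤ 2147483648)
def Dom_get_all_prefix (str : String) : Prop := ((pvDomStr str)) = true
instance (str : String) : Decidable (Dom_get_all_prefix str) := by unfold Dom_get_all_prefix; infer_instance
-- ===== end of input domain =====

-- B replaces A's per-index rebuild-and-rejoin of each prefix with a single accumulating sweep (objective: simpler).

-- ===== PORT A =====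
def word2key (arr : List String) : String :=
  if arr = [] then ""
  else arr.foldl (fun s i => if PySem.Str.len s ≠ 0 then s ++ "," ++ i else i) ""

def key2word (s : String) : List String :=
  if s = "" then [] else (PySem.Str.split? s ",").getD []

def get_all_prefix (str : String) : List String :=
  let word := key2word str
  (PySem.List.pyRange 0 (PySem.List.len word) 1).foldl
    (fun prefixes i =>
      let str_lst := (PySem.List.pyRange 0 (i + 1) 1).foldl
        (fun l j => l ++ [PySem.List.pyGetD word j ""]) []
      prefixes ++ [word2key str_lst]) []

-- ===== PORT B =====
def get_all_prefix_alt (str : String) : List String :=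
  let tokens := if str = "" then [] else (PySem.Str.split? str ",").getD []
  (tokens.foldl (fun st w =>
      let acc := if st.2 = "" then w else st.2 ++ "," ++ w
      (st.1 ++ [acc], acc)) ([], "")).1

-- ===== PRECONDITION & SPEC =====
def Spec_get_all_prefix (str : String) (out : List String) : Prop := out = get_all_prefix_alt str
instance (str : String) (out : List String) : Decidable (Spec_get_all_prefix str out) := by unfold Spec_get_all_prefix; infer_instance

-- ===== CLAIM (what is proved, stated in full; the proofs are below) =====
def Claim_equal_get_all_prefix : Prop := ∀ (str : String), Dom_get_all_prefix str → Spec_get_all_prefix str (get_all_prefix str)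

-- ===== LEMMAS AND PROOFS =====

-- the common step function: the string both Pythons build from the accumulator and the next token
def pvStep (s i : String) : String := if s = "" then i else s ++ "," ++ i

lemma word2key_eq_foldl (l : List String) : word2key l = l.foldl pvStep "" := by
  unfold word2key
  split
  · simp [*]
  · apply PySem.List.foldl_congr_mem
    intro s i _
    simp only [pvStep, PySem.Str.len_eq]
    by_cases h : s = "" <;> simp [h]

lemma range_map_getD_eq_take (word : List String) (m : ℕ) (hm : m ≤ word.length) :
    (List.range m).map (fun k => word.getD k "") = word.take m := by
  apply List.ext_getElem
  · simpa using hm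
  · intro i h1 h2
    have : i < word.length := lt_of_lt_of_le (by simpa using h1) hm
    simp [List.getD_eq_getElem?_getD, List.getElem?_eq_getElem this]

lemma a_entry (word : List String) (k : ℕ) (hk : k < word.length) :
    (PySem.List.pyRange 0 ((k : ℤ) + 1) 1).foldl
      (fun l j => l ++ [PySem.List.pyGetD word j ""]) [] = word.take (k + 1) := by
  rw [PySem.List.foldl_append_singleton_eq_map, PySem.List.pyRange_one]
  have : ((k : ℤ) + 1 - 0).toNat = k + 1 := by omega
  rw [this, ← range_map_getD_eq_take word (k + 1) (by omega)]
  simp [List.map_map, Function.comp_def]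

lemma a_eq_map (word : List String) :
    (PySem.List.pyRange 0 (PySem.List.len word) 1).foldl
      (fun prefixes i =>
        prefixes ++ [word2key ((PySem.List.pyRange 0 (i + 1) 1).foldl
          (fun l j => l ++ [PySem.List.pyGetD word j ""]) [])]) []
    = (List.range word.length).map (fun k => (word.take (k + 1)).foldl pvStep "") := by
  rw [PySem.List.foldl_append_singleton_eq_map, PySem.List.pyRange_one]
  simp only [PySem.List.len_eq, List.map_map, Int.sub_zero, Int.toNat_natCast]
  apply List.map_congr_left
  intro k hk
  simp only [Function.comp_apply, zero_add]
  rw [a_entry word k (List.mem_range.mp hk), word2key_eq_foldl]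

lemma b_invariant (l : List String) (p : List String) (a : String) :
    (l.foldl (fun st w =>
        let acc := if st.2 = "" then w else st.2 ++ "," ++ w
        (st.1 ++ [acc], acc)) (p, a)).1
    = p ++ (List.range l.length).map (fun k => (l.take (k + 1)).foldl pvStep a) := by
  induction l generalizing p a with
  | nil => simp
  | cons w t ih =>
      simp only [List.foldl_cons, ih, List.length_cons, List.range_succ_eq_map,
        List.map_cons, List.map_map]
      simp [pvStep, Function.comp_def, List.append_assoc]

-- ===== VERDICT (by name: the statement is the Claim_ definition above) =====
theorem get_all_prefix_spec : Claim_equal_get_all_prefix := by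
  intro str _
  unfold Spec_get_all_prefix get_all_prefix get_all_prefix_alt key2word
  rw [a_eq_map, b_invariant]
  simp
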